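-- pv_equiv track=rewrite | github.com/mateustalles/mateustalles.github.io | recursivity/find_biggest_int.py | find_biggest_int
-- ===== SOURCE A (Python) =====
-- def find_biggest_int(numberlist, index = 0, value = 0):
--     if not numberlist:
--         raise ValueError("List cannot be empty")
--
--     for item in numberlist:
--         if not isinstance(item, int):
--             raise ValueError("Only int items are allowed")
--
--     if index == len(numberlist): return value
--
--     elif numberlist[index] >= value:
--         value = numberlist[index]
--         index += 1
--         return find_biggest_int(numberlist, index, value)
--
--     else:
--         index += 1
--         return find_biggest_int(numberlist, index, value)
-- ===== SOURCE B (Python) =====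
-- def find_biggest_int(numberlist, index=0, value=0):
--     if not numberlist:
--         raise ValueError("List cannot be empty")
--     if any(not isinstance(item, int) for item in numberlist):
--         raise ValueError("Only int items are allowed")
--     n = len(numberlist)
--     i, best = index, value
--     while i != n:
--         item = numberlist[i]
--         if item > best:
--             best = item
--         i += 1
--     return best
-- ===== Notes on version B (the rewrite author's own statement) =====
-- stated objective: faster
-- what changed: Replaces A's recursion (which re-validates the whole list on every recursive call) with a single validation pass followed by one iterative running-max loop.
import Mathlib
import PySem

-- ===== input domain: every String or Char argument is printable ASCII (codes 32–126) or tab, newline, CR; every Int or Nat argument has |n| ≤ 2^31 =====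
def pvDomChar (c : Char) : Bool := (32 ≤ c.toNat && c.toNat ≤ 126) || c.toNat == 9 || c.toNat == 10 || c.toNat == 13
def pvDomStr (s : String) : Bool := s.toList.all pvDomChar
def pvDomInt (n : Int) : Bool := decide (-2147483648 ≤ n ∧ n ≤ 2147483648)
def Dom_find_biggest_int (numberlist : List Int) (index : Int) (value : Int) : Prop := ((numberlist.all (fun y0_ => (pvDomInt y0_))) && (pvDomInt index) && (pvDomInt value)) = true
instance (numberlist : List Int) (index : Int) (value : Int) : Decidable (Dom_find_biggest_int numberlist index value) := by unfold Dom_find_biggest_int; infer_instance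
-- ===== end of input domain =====

-- B replaces A's recursion (re-validating the list on every call, O(n^2)) by one validation
-- pass plus one iterative running-max loop (O(n)); equal on all inputs where A returns.

-- ===== PORT A =====
-- Literal port of A's recursion. The `isinstance` validation loop is vacuous on List Int
-- (the type guarantees int items). A ValueError / IndexError (empty list, index out of
-- Python's wraparound range) is `0` here and excluded by Pre_.
def find_biggest_int (numberlist : List Int) (index : Int) (value : Int) : Int :=
  if numberlist = [] then 0          -- raise ValueError("List cannot be empty")
  else if index = numberlist.length then value
  else
    match h : PySem.List.pyGet? numberlist index with
    | none => 0                      -- IndexError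
    | some item =>
      if item ≥ value then find_biggest_int numberlist (index + 1) item
      else find_biggest_int numberlist (index + 1) value
termination_by (numberlist.length - index).toNat
decreasing_by
  all_goals
    have h2 := PySem.List.pyGet?_eq_none_iff (xs := numberlist) (i := index)
    simp [h] at h2
    unfold PySem.Raise.InRange at h2
    omega

-- ===== PORT B =====
-- B's while loop: `while i != n: item = numberlist[i]; if item > best: best = item; i += 1`.
def fbiLoop (numberlist : List Int) (n : Int) (i : Int) (best : Int) : Int :=
  if i = n then best
  else
    match h : PySem.List.pyGet? numberlist i with
    | none => 0                      -- IndexError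
    | some item => fbiLoop numberlist n (i + 1) (if item > best then item else best)
termination_by (numberlist.length - i).toNat
decreasing_by
  have h2 := PySem.List.pyGet?_eq_none_iff (xs := numberlist) (i := i)
  simp [h] at h2
  unfold PySem.Raise.InRange at h2
  omega

def find_biggest_int_alt (numberlist : List Int) (index : Int) (value : Int) : Int :=
  if numberlist = [] then 0          -- raise ValueError("List cannot be empty")
  else fbiLoop numberlist numberlist.length index value

-- ===== PRECONDITION & SPEC =====
-- Pre_: exactly the inputs where the Python A returns (non-empty list, index within
-- Python's wraparound range or equal to the length); elsewhere A raises ValueError/IndexError.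
def Pre_find_biggest_int (numberlist : List Int) (index : Int) (value : Int) : Prop :=
  numberlist ≠ [] ∧ -(numberlist.length : Int) ≤ index ∧ index ≤ numberlist.length
instance (numberlist : List Int) (index : Int) (value : Int) : Decidable (Pre_find_biggest_int numberlist index value) := by unfold Pre_find_biggest_int; infer_instance
def pvWitness_find_biggest_int : List Int × Int × Int := ([3, -1, 7, 2], 0, 0)

def Spec_find_biggest_int (numberlist : List Int) (index : Int) (value : Int) (out : Int) : Prop := out = find_biggest_int_alt numberlist index value
instance (numberlist : List Int) (index : Int) (value : Int) (out : Int) : Decidable (Spec_find_biggest_int numberlist index value out) := by unfold Spec_find_biggest_int; infer_instance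

-- ===== CLAIM (what is proved, stated in full; the proofs are below) =====
def Claim_equal_find_biggest_int : Prop := ∀ (numberlist : List Int) (index : Int) (value : Int), Dom_find_biggest_int numberlist index value → Pre_find_biggest_int numberlist index value → Spec_find_biggest_int numberlist index value (find_biggest_int numberlist index value)

-- ===== LEMMAS AND PROOFS =====

-- A's recursion and B's loop compute the same value from any start state.
theorem fbi_eq_loop (numberlist : List Int) (hne : numberlist ≠ []) :
    ∀ (index value : Int),
    find_biggest_int numberlist index value = fbiLoop numberlist numberlist.length index value := by
  intro index value
  induction index, value using find_biggest_int.induct numberlist with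
  | case1 i v hnil => exact absurd hnil hne
  | case2 v hnil =>
    rw [find_biggest_int, fbiLoop]
    simp [hnil]
  | case3 i v hnil hlen h =>
    rw [find_biggest_int, fbiLoop]
    simp only [if_neg hnil, if_neg hlen]
    rw [h]
  | case4 i v hnil hlen item h hge ih =>
    rw [find_biggest_int, fbiLoop]
    have hsel : (if item > v then item else v) = item := by
      by_cases hc : item > v
      · simp [hc]
      · simp [hc]; omega
    simp only [if_neg hnil, if_neg hlen]
    rw [h]
    simp only [ih, hsel, if_pos (show v ≤ item by omega)]
  | case5 i v hnil hlen item h hge ih =>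
    rw [find_biggest_int, fbiLoop]
    have hsel : (if item > v then item else v) = v := by
      have : ¬ item > v := by omega
      simp [this]
    simp only [if_neg hnil, if_neg hlen]
    rw [h]
    simp only [ih, hsel, if_neg (show ¬ v ≤ item by omega)]

-- ===== VERDICT (by name: the statement is the Claim_ definition above) =====
theorem find_biggest_int_spec : Claim_equal_find_biggest_int := by
  intro nl i v _hdom hpre
  unfold Spec_find_biggest_int find_biggest_int_alt
  have hne := hpre.1
  simp [hne]
  exact fbi_eq_loop nl hne i v
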